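-- pv_equiv track=rewrite | github.com/YanekHay/Python-Tasks | Lessons/FromBenStephenson/Book149-172.py | getCleanWords
-- ===== SOURCE A (Python) =====
-- def getCleanWords(text:str)->list:
--     punctuation = "-!@#$%^&*()_+/*<>?~`:;,.\n"
--     words = []
--         ### Getting all words
--     for mark in punctuation:
--         text = text.replace(mark,"")
--     text = text.split(" ")
--     nline = []
--     for i in text:
--         if i!='':
--             nline.append(i)
--
--     words.extend(nline)
--     return words
-- ===== SOURCE B (Python) =====
-- def getCleanWords(text: str) -> list:
--     # One pass: skip punctuation chars, split words on ' ', never building intermediate strings of the whole text.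
--     punctuation = "-!@#$%^&*()_+/*<>?~`:;,.\n"
--     words = []
--     buf = []
--     for ch in text:
--         if ch == ' ':
--             if buf:
--                 words.append(''.join(buf))
--                 buf = []
--         elif ch in punctuation:
--             pass
--         else:
--             buf.append(ch)
--     if buf:
--         words.append(''.join(buf))
--     return words
-- ===== Notes on version B (the rewrite author's own statement) =====
-- stated objective: alternative
-- what changed: A makes 24 whole-string replace passes (one per punctuation mark), then splits and filters empties in two more passes; B is a single character-level pass with a word buffer that skips punctuation and flushes the buffer at each space.
import Mathlib
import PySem

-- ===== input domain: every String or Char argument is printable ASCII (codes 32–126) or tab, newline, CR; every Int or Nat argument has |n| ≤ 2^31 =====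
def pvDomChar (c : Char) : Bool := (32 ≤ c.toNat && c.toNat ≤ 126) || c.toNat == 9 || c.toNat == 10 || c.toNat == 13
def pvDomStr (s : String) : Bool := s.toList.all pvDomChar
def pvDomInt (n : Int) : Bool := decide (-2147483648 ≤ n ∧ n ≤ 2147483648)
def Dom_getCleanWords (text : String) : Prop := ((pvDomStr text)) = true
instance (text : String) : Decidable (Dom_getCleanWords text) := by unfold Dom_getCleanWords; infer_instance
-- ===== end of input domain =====

-- B replaces A's 24 whole-string replace passes + split + filter-empties by a single pass over the
-- characters with a word buffer (objective: alternative; one traversal instead of 26, speed not claimed).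

-- ===== PORT A =====
-- A: for mark in punctuation: text = text.replace(mark, ""); then text.split(" "); then drop '' pieces.
def getCleanWords (text : String) : List String :=
  let punctuation : String := "-!@#$%^&*()_+/*<>?~`:;,.\n"
  let text1 : String := punctuation.toList.foldl (fun t mark => PySem.Str.replace t (String.ofList [mark]) "") text
  -- sep " " is nonempty, so Python's split never raises; split? is some here
  let parts : List String := (PySem.Str.split? text1 " ").getD []
  let nline : List String := parts.foldl (fun acc i => if i ≠ "" then acc ++ [i] else acc) []
  [] ++ nline

-- ===== PORT B =====
def pvPunct : List Char := "-!@#$%^&*()_+/*<>?~`:;,.\n".toList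

def altGo : List Char → List Char → List String → List String
  | [], buf, words => if buf.isEmpty then words else words ++ [String.ofList buf]
  | c :: rest, buf, words =>
    if c = ' ' then
      if buf.isEmpty then altGo rest buf words
      else altGo rest [] (words ++ [String.ofList buf])
    else if pvPunct.contains c then altGo rest buf words
    else altGo rest (buf ++ [c]) words

def getCleanWords_alt (text : String) : List String := altGo text.toList [] []

-- ===== PRECONDITION & SPEC =====
def Spec_getCleanWords (text : String) (out : List String) : Prop := out = getCleanWords_alt text
instance (text : String) (out : List String) : Decidable (Spec_getCleanWords text out) := by unfold Spec_getCleanWords; infer_instance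

-- ===== CLAIM (what is proved, stated in full; the proofs are below) =====
def Claim_equal_getCleanWords : Prop := ∀ (text : String), Dom_getCleanWords text → Spec_getCleanWords text (getCleanWords text)

-- ===== LEMMAS AND PROOFS =====

-- what splitOn.go computes for sep " " (cur is the reversed current chunk)
def spl : List Char → List Char → List (List Char)
  | [], cur => [cur.reverse]
  | c :: t, cur => if c = ' ' then cur.reverse :: spl t [] else spl t (c :: cur)

-- the nonempty words of a punctuation-free list, given the current buffer (in order)
def wordsOf : List Char → List Char → List (List Char)
  | [], buf => if buf = [] then [] else [buf]
  | c :: t, buf => if c = ' ' then (if buf = [] then wordsOf t [] else buf :: wordsOf t []) else wordsOf t (buf ++ [c])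

theorem replace_go_single (m : Char) : ∀ (fuel : Nat) (l acc : List Char), l.length ≤ fuel →
    PySem.Chars.replace.go [m] [] fuel l acc = acc.reverse ++ l.filter (fun c => c ≠ m) := by
  intro fuel
  induction fuel with
  | zero => intro l acc h; simp at h; subst h; simp [PySem.Chars.replace.go]
  | succ n ih =>
    intro l acc h
    cases l with
    | nil => simp [PySem.Chars.replace.go]
    | cons c t =>
      simp [PySem.Chars.replace.go, List.isPrefixOf]
      by_cases hc : m = c
      · subst hc; simp [ih t acc (by simpa using h)]
      · simp [hc, Ne.symm hc, ih t (c :: acc) (by simpa using h)]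

theorem replace_single (s : List Char) (m : Char) :
    PySem.Chars.replace s [m] [] = s.filter (fun c => c ≠ m) := by
  simp [PySem.Chars.replace, replace_go_single m s.length s [] (le_refl _)]

theorem foldl_replace (ps : List Char) : ∀ (s : String),
    (ps.foldl (fun t mark => PySem.Str.replace t (String.ofList [mark]) "") s).toList
      = s.toList.filter (fun c => !ps.contains c) := by
  induction ps with
  | nil => intro s; simp
  | cons p ps ih =>
    intro s
    rw [List.foldl_cons, ih, PySem.Str.toList_replace]
    simp only [String.toList_ofList, show ("" : String).toList = ([] : List Char) from rfl]
    rw [replace_single, List.filter_filter]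
    congr 1
    funext c
    by_cases h : c = p <;> simp [h]

theorem splitOn_go_space : ∀ (fuel : Nat) (l cur : List Char) (acc : List (List Char)), l.length ≤ fuel →
    PySem.Chars.splitOn.go [' '] fuel l cur acc = acc.reverse ++ spl l cur := by
  intro fuel
  induction fuel with
  | zero => intro l cur acc h; simp at h; subst h; simp [PySem.Chars.splitOn.go, spl]
  | succ n ih =>
    intro l cur acc h
    cases l with
    | nil => simp [PySem.Chars.splitOn.go, spl]
    | cons c t =>
      simp only [PySem.Chars.splitOn.go, List.isPrefixOf]
      by_cases hc : c = ' '
      · subst hc; simp [spl, ih t [] (cur.reverse :: acc) (by simpa using h)]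
      · simp [hc, Ne.symm hc, spl, ih t (c :: cur) acc (by simpa using h)]

theorem splitOn_space (l : List Char) : PySem.Chars.splitOn l [' '] = spl l [] := by
  simp [PySem.Chars.splitOn, splitOn_go_space (l.length + 1) l [] [] (by omega)]

theorem filter_spl : ∀ (l cur : List Char),
    (spl l cur).filter (fun w => !decide (w = [])) = wordsOf l cur.reverse := by
  intro l
  induction l with
  | nil =>
    intro cur
    by_cases h : cur.reverse = [] <;> simp [spl, wordsOf, h]
  | cons c t ih =>
    intro cur
    by_cases hc : c = ' '
    · subst hc
      by_cases h : cur.reverse = [] <;>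
        simpa [spl, wordsOf, h] using ih []
    · simpa [spl, wordsOf, hc] using ih (c :: cur)

theorem space_not_punct : ¬ (' ' ∈ pvPunct) := by decide

theorem altGo_spec : ∀ (cs buf : List Char) (words : List String),
    altGo cs buf words = words ++ (wordsOf (cs.filter (fun c => !decide (c ∈ pvPunct))) buf).map String.ofList := by
  intro cs
  induction cs with
  | nil =>
    intro buf words
    by_cases h : buf = [] <;> simp [altGo, wordsOf, h, List.isEmpty_iff]
  | cons c t ih =>
    intro buf words
    by_cases hc : c = ' '
    · subst hc
      by_cases h : buf = [] <;>
        simp [altGo, wordsOf, space_not_punct, h, List.isEmpty_iff, ih]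
    · by_cases hp : c ∈ pvPunct
      · simp [altGo, hc, hp, ih]
      · simp [altGo, wordsOf, hc, hp, ih]

theorem filter_map_ofList (l : List (List Char)) :
    (l.map String.ofList).filter (fun i => !decide (i = "")) = (l.filter (fun w => !decide (w = []))).map String.ofList := by
  induction l with
  | nil => simp
  | cons w t ih =>
    by_cases h : w = [] <;>
      simp [h, ih, String.ofList_eq_empty_iff]

-- ===== VERDICT (by name: the statement is the Claim_ definition above) =====
theorem getCleanWords_spec : Claim_equal_getCleanWords := by
  intro text _
  unfold Spec_getCleanWords getCleanWords getCleanWords_alt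
  simp only
  rw [PySem.Str.split?]
  simp only [PySem.Chars.split?, show (" " : String).toList = [' '] from rfl,
    show (([' '] : List Char).isEmpty = false) from rfl, Bool.false_eq_true, if_false,
    Option.map_some, Option.getD_some, foldl_replace, splitOn_space]
  have hfun : (fun (acc : List String) (i : String) => if i ≠ "" then acc ++ [i] else acc)
      = (fun acc i => if (!decide (i = "")) = true then acc ++ [id i] else acc) := by
    funext acc i; by_cases h : i = "" <;> simp [h]
  rw [hfun, PySem.List.foldl_append_if, altGo_spec]
  simp only [List.map_id, List.nil_append, List.contains_eq_mem]
  rw [filter_map_ofList, filter_spl]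
  rfl
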